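-- pv_equiv track=rewrite | github.com/joelmontavon/fhir4ds3 | tests/integration/fhirpath/official_test_runner.py | _is_simple_path_expression
-- ===== SOURCE A (Python) =====
-- def _is_simple_path_expression(expression: str) -> bool:
--     """Determine if an expression is a simple identifier path (no functions/operators)."""
--     stripped = (expression or "").strip()
--     if not stripped:
--         return False
--
--     # Reject expressions containing whitespace (beyond separators) or function/operator characters
--     disallowed_chars = set(" ()[]{}+-*/%=!<>&|^\",'\"")
--     if any(char in disallowed_chars for char in stripped):
--         return False
--
--     # Allow letters, digits, '.', '`', and '$' (for variables)
--     allowed_chars = set("abcdefghijklmnopqrstuvwxyzABCDEFGHIJKLMNOPQRSTUVWXYZ0123456789._`$")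
--     return all(char in allowed_chars for char in stripped)
-- ===== SOURCE B (Python) =====
-- import re
--
-- _SIMPLE_PATH_RE = re.compile(r'[A-Za-z0-9._`$]+')
--
-- def _is_simple_path_expression(expression: str) -> bool:
--     stripped = (expression or "").strip()
--     return bool(stripped) and _SIMPLE_PATH_RE.fullmatch(stripped) is not None
-- ===== Notes on version B (the rewrite author's own statement) =====
-- stated objective: idiomatic
-- what changed: B drops A's redundant disallowed-character scan (every disallowed char is already outside the allowed set) and replaces the two explicit per-character set-membership scans with a single anchored character-class regex fullmatch on the stripped string.
import Mathlib
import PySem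

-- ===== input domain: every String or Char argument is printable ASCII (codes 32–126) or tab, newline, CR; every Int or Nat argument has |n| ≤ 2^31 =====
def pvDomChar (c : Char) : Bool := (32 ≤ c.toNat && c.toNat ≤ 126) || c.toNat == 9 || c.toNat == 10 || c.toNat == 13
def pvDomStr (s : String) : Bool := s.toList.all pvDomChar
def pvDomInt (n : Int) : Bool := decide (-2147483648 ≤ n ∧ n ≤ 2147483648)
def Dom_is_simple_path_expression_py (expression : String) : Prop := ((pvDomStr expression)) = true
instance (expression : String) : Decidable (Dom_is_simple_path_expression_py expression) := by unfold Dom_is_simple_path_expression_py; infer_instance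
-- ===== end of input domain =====

-- B drops A's redundant disallowed-character scan and replaces the two set-membership
-- scans with one anchored character-class match on the stripped string (idiomatic).

-- ===== PORT A =====
def pvDisallowedA (c : Char) : Bool := " ()[]{}+-*/%=!<>&|^\",'\"".toList.contains c
def pvAllowedA (c : Char) : Bool :=
  "abcdefghijklmnopqrstuvwxyzABCDEFGHIJKLMNOPQRSTUVWXYZ0123456789._`$".toList.contains c

def is_simple_path_expression_py (expression : String) : Bool :=
  let stripped := PySem.Str.strip expression
  if PySem.Str.len stripped == 0 then false
  else if stripped.toList.any (fun c => pvDisallowedA c) then false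
  else stripped.toList.all (fun c => pvAllowedA c)

-- ===== PORT B =====
-- hand port of the regex character class [A-Za-z0-9._`$] (exact on this ASCII class)
def pvClassB (c : Char) : Bool :=
  ('A' ≤ c && c ≤ 'Z') || ('a' ≤ c && c ≤ 'z') || ('0' ≤ c && c ≤ '9') ||
  c == '.' || c == '_' || c == '`' || c == '$'

def is_simple_path_expression_py_alt (expression : String) : Bool :=
  let stripped := PySem.Str.strip expression
  !(PySem.Str.len stripped == 0) && stripped.toList.all pvClassB

-- ===== PRECONDITION & SPEC =====
def Spec_is_simple_path_expression_py (expression : String) (out : Bool) : Prop := out = is_simple_path_expression_py_alt expression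
instance (expression : String) (out : Bool) : Decidable (Spec_is_simple_path_expression_py expression out) := by unfold Spec_is_simple_path_expression_py; infer_instance

-- ===== CLAIM (what is proved, stated in full; the proofs are below) =====
def Claim_equal_is_simple_path_expression_py : Prop := ∀ (expression : String), Dom_is_simple_path_expression_py expression → Spec_is_simple_path_expression_py expression (is_simple_path_expression_py expression)

-- ===== LEMMAS AND PROOFS =====

theorem char_le_iff (a b : Char) : a ≤ b ↔ a.toNat ≤ b.toNat := by
  rw [Char.le_def, UInt32.le_iff_toNat_le]; exact Iff.rfl

theorem char_eq_iff (a b : Char) : a = b ↔ a.toNat = b.toNat :=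
  ⟨fun h => by rw [h], fun h => Char.ext (UInt32.toNat_inj.mp h)⟩

theorem eAllowed : "abcdefghijklmnopqrstuvwxyzABCDEFGHIJKLMNOPQRSTUVWXYZ0123456789._`$".toList
    = ['a','b','c','d','e','f','g','h','i','j','k','l','m','n','o','p','q','r','s','t','u','v','w','x','y','z','A','B','C','D','E','F','G','H','I','J','K','L','M','N','O','P','Q','R','S','T','U','V','W','X','Y','Z','0','1','2','3','4','5','6','7','8','9','.','_','`','$'] := by decide

theorem eDis : " ()[]{}+-*/%=!<>&|^\",'\"".toList
    = [' ','(',')','[',']','{','}','+','-','*','/','%','=','!','<','>','&','|','^','"',',','\'','\"'] := by decide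

-- A's allowed set is exactly B's regex character class
theorem pvAllowed_eq_class (c : Char) : pvAllowedA c = pvClassB c := by
  rw [Bool.eq_iff_iff]
  simp only [pvAllowedA, pvClassB, eAllowed, List.contains_eq_mem, List.mem_cons,
    List.not_mem_nil, or_false, decide_eq_true_eq, Bool.or_eq_true, Bool.and_eq_true,
    beq_iff_eq, char_eq_iff, char_le_iff, Char.reduceToNat]
  omega

-- A's disallowed set is disjoint from its allowed set (the first scan is redundant)
theorem pvDisallowed_not_allowed (c : Char) (h : pvDisallowedA c = true) :
    pvAllowedA c = false := by
  simp only [pvDisallowedA, eDis, List.contains_eq_mem, List.mem_cons, List.not_mem_nil,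
    or_false, decide_eq_true_eq] at h
  rcases h with h|h|h|h|h|h|h|h|h|h|h|h|h|h|h|h|h|h|h|h|h|h|h <;> subst h <;> decide

-- if n==0 short-circuits, the redundancy of the disallowed scan gives the single-scan form
theorem pvKey (n : Int) (l : List Char) :
    (if n == 0 then false
     else if l.any (fun c => pvDisallowedA c) then false
     else l.all (fun c => pvAllowedA c))
  = (!(n == 0) && l.all pvClassB) := by
  by_cases h : n == 0
  · simp [h]
  · by_cases ha : l.any (fun c => pvDisallowedA c)
    · obtain ⟨c, hc, hd⟩ := List.any_eq_true.mp ha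
      have hn : (n == 0) = false := by simp_all
      rw [if_neg (by simp [hn]), if_pos ha, hn]
      symm
      simp only [Bool.not_false, Bool.true_and]
      refine List.all_eq_false.mpr ⟨c, hc, ?_⟩
      simp [← pvAllowed_eq_class, pvDisallowed_not_allowed c hd]
    · have hn : (n == 0) = false := by simp_all
      rw [if_neg (by simp [hn]), if_neg ha, hn,
        funext pvAllowed_eq_class]
      simp

-- ===== VERDICT (by name: the statement is the Claim_ definition above) =====
theorem is_simple_path_expression_py_spec : Claim_equal_is_simple_path_expression_py := by
  intro e _
  unfold Spec_is_simple_path_expression_py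
  exact pvKey _ _
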